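-- pv_equiv track=rewrite | github.com/lucasgsfelix/Gera-o-de-Roteiros-Tur-sticos---Planet-Caravan | src/model/constraints.py | verify_amount_places
-- ===== SOURCE A (Python) =====
-- def verify_amount_places(new_route, users_parameters, places_parameters):
--     """
--     Verifica a quantidade máxima de locais a serem visitados em um dia
--     """
--
--     # -1 pois não podemos considerar o hotel!
--
--     count = 0
--
--     for place in new_route:
--
--         if place == places_parameters["hotel"]:
--
--             count = 0
--
--         else:
--
--             count += 1
--
--         if count > users_parameters["amount_daily_places"]:
--
--             return False
--
--     return True
-- ===== SOURCE B (Python) =====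
-- def verify_amount_places(new_route, users_parameters, places_parameters):
--     """
--     Verifica a quantidade maxima de locais a serem visitados em um dia
--     """
--     hotel = places_parameters["hotel"]
--     limit = users_parameters["amount_daily_places"]
--
--     # Phase 1: collect the lengths of the maximal runs of non-hotel places.
--     segments = []
--     current = 0
--     for place in new_route:
--         if place == hotel:
--             if current:
--                 segments.append(current)
--             current = 0
--         else:
--             current += 1
--     if current:
--         segments.append(current)
--
--     # Phase 2: every day's run must fit within the limit.
--     return all(seg <= limit for seg in segments)
-- ===== Notes on version B (the rewrite author's own statement) =====
-- stated objective: simpler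
-- what changed: B first splits the route into the lengths of the maximal non-hotel runs and then checks all of them with all(seg <= limit), instead of fusing counting and testing in one early-exiting loop.
-- intended difference: On a nonempty route consisting only of the hotel with a negative amount_daily_places, A returns False (its count > limit check fires at count 0 though no place is visited) while B returns True, the intended value since such a route visits zero places per day. — e.g. on verify_amount_places(["h"], [("amount_daily_places", -1)], [("hotel", "h")]): A returns false, B returns true
-- outside the precondition, e.g. on verify_amount_places([], {}, {}): A returns True, B raises KeyError
import Mathlib
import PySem

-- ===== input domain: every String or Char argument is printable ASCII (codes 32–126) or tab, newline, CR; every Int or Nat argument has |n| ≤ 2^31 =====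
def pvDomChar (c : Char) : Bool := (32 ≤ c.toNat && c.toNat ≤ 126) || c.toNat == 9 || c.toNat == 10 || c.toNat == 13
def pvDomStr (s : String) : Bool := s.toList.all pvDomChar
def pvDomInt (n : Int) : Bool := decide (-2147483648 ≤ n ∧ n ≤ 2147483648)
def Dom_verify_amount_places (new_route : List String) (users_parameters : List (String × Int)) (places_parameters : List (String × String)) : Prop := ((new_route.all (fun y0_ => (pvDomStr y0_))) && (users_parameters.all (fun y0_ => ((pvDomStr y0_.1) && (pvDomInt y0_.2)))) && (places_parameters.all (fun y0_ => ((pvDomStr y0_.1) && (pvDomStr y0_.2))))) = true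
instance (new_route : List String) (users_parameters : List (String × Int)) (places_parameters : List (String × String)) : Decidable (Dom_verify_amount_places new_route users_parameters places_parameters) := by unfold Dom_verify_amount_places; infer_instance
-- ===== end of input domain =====

-- B splits the route into the lengths of the maximal non-hotel runs and then checks them all,
-- instead of A's fused counting-and-testing early-exit loop (objective: simpler).


-- ===== PORT A =====
-- A's loop: count places since the last hotel, early-return False as soon as count > limit.
def vapA_loop (hotel : String) (limit : Int) : List String → Int → Bool
  | [], _ => true
  | p :: rest, count =>
    let c : Int := if p == hotel then 0 else count + 1
    if c > limit then false else vapA_loop hotel limit rest c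

def verify_amount_places (new_route : List String) (users_parameters : List (String × Int)) (places_parameters : List (String × String)) : Bool :=
  -- the dict lookups happen inside A's loop; Pre_ guarantees both keys are present, so the
  -- .getD defaults are never the values used on admitted inputs
  vapA_loop ((List.lookup "hotel" places_parameters).getD "")
            ((List.lookup "amount_daily_places" users_parameters).getD 0) new_route 0

-- ===== PORT B =====
-- Phase 1 of Source B: collect the lengths of the maximal non-hotel runs.
def vapB_segs (hotel : String) : List String → Int → List Int → List Int
  | [], current, segments => if current ≠ 0 then segments ++ [current] else segments
  | p :: rest, current, segments =>
    if p == hotel then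
      vapB_segs hotel rest 0 (if current ≠ 0 then segments ++ [current] else segments)
    else
      vapB_segs hotel rest (current + 1) segments

def verify_amount_places_alt (new_route : List String) (users_parameters : List (String × Int)) (places_parameters : List (String × String)) : Bool :=
  let hotel := (List.lookup "hotel" places_parameters).getD ""
  let limit := (List.lookup "amount_daily_places" users_parameters).getD 0
  (vapB_segs hotel new_route 0 []).all (fun seg => seg ≤ limit)

-- ===== PRECONDITION & SPEC =====
-- Pre_ excludes inputs missing either dict key: A only looks the keys up inside its loop, so on an
-- empty route it returns True where B (which looks them up first) raises KeyError.
def Pre_verify_amount_places (new_route : List String) (users_parameters : List (String × Int)) (places_parameters : List (String × String)) : Prop :=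
  (List.lookup "hotel" places_parameters).isSome = true ∧
  (List.lookup "amount_daily_places" users_parameters).isSome = true
instance (new_route : List String) (users_parameters : List (String × Int)) (places_parameters : List (String × String)) : Decidable (Pre_verify_amount_places new_route users_parameters places_parameters) := by unfold Pre_verify_amount_places; infer_instance

def pvWitness_verify_amount_places : List String × (List (String × Int)) × (List (String × String)) :=
  (["a", "b", "h", "a"], [("amount_daily_places", 2)], [("hotel", "h")])

-- On a nonempty route consisting only of the hotel with a negative amount_daily_places, A returns
-- False (its `count > limit` check fires at count 0, though no place is visited) while B returns
-- True, the intended value since such a route visits zero places per day.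
def D_verify_amount_places (new_route : List String) (users_parameters : List (String × Int)) (places_parameters : List (String × String)) : Prop :=
  new_route ≠ [] ∧
  (∃ v, List.lookup "amount_daily_places" users_parameters = some v ∧ v < 0) ∧
  (∃ h, List.lookup "hotel" places_parameters = some h ∧ ∀ p ∈ new_route, p = h)
instance (new_route : List String) (users_parameters : List (String × Int)) (places_parameters : List (String × String)) : Decidable (D_verify_amount_places new_route users_parameters places_parameters) := by unfold D_verify_amount_places; infer_instance

def Spec_verify_amount_places (new_route : List String) (users_parameters : List (String × Int)) (places_parameters : List (String × String)) (out : Bool) : Prop := ¬ D_verify_amount_places new_route users_parameters places_parameters → out = verify_amount_places_alt new_route users_parameters places_parameters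

def pvDiffWitness_verify_amount_places : List String × (List (String × Int)) × (List (String × String)) :=
  (["h"], [("amount_daily_places", -1)], [("hotel", "h")])
def pvDiffWitnessOut_verify_amount_places : Bool × Bool := (false, true)
instance (new_route : List String) (users_parameters : List (String × Int)) (places_parameters : List (String × String)) (out : Bool) : Decidable (Spec_verify_amount_places new_route users_parameters places_parameters out) := by unfold Spec_verify_amount_places; infer_instance

-- ===== CLAIM (what is proved, stated in full; the proofs are below) =====
def Claim_unchanged_verify_amount_places : Prop := ∀ (new_route : List String) (users_parameters : List (String × Int)) (places_parameters : List (String × String)), Dom_verify_amount_places new_route users_parameters places_parameters → Pre_verify_amount_places new_route users_parameters places_parameters → Spec_verify_amount_places new_route users_parameters places_parameters (verify_amount_places new_route users_parameters places_parameters)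
def Claim_changed_verify_amount_places : Prop := Dom_verify_amount_places (pvDiffWitness_verify_amount_places.1) (pvDiffWitness_verify_amount_places.2.1) (pvDiffWitness_verify_amount_places.2.2) ∧ Pre_verify_amount_places (pvDiffWitness_verify_amount_places.1) (pvDiffWitness_verify_amount_places.2.1) (pvDiffWitness_verify_amount_places.2.2) ∧ D_verify_amount_places (pvDiffWitness_verify_amount_places.1) (pvDiffWitness_verify_amount_places.2.1) (pvDiffWitness_verify_amount_places.2.2) ∧ verify_amount_places (pvDiffWitness_verify_amount_places.1) (pvDiffWitness_verify_amount_places.2.1) (pvDiffWitness_verify_amount_places.2.2) = pvDiffWitnessOut_verify_amount_places.1 ∧ verify_amount_places_alt (pvDiffWitness_verify_amount_places.1) (pvDiffWitness_verify_amount_places.2.1) (pvDiffWitness_verify_amount_places.2.2) = pvDiffWitnessOut_verify_amount_places.2 ∧ pvDiffWitnessOut_verify_amount_places.1 ≠ pvDiffWitnessOut_verify_amount_places.2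
def Claim_exact_verify_amount_places : Prop := ∀ (new_route : List String) (users_parameters : List (String × Int)) (places_parameters : List (String × String)), Dom_verify_amount_places new_route users_parameters places_parameters → Pre_verify_amount_places new_route users_parameters places_parameters → D_verify_amount_places new_route users_parameters places_parameters → verify_amount_places new_route users_parameters places_parameters ≠ verify_amount_places_alt new_route users_parameters places_parameters

-- ===== LEMMAS AND PROOFS =====

-- The accumulator of vapB_segs is only appended to.
theorem vapB_segs_acc (hotel : String) (l : List String) (current : Int) (segments : List Int) :
    vapB_segs hotel l current segments = segments ++ vapB_segs hotel l current [] := by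
  induction l generalizing current segments with
  | nil => simp [vapB_segs]; split <;> simp
  | cons p rest ih =>
    simp only [vapB_segs]
    split
    · rw [ih, ih 0 (if current ≠ 0 then [] ++ [current] else [])]
      split <;> simp
    · rw [ih, ih (current + 1) []]

-- With a strictly positive current run, the produced segments contain one of length ≥ current.
theorem vapB_segs_big (hotel : String) (l : List String) (current : Int) (h : 1 ≤ current) :
    ∃ s ∈ vapB_segs hotel l current [], current ≤ s := by
  induction l generalizing current with
  | nil =>
    refine ⟨current, ?_, le_refl _⟩
    simp [vapB_segs]
    omega
  | cons p rest ih =>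
    simp only [vapB_segs]
    split
    · rw [vapB_segs_acc]
      refine ⟨current, ?_, le_refl _⟩
      have : current ≠ 0 := by omega
      simp [this]
    · obtain ⟨s, hs, hle⟩ := ih (current + 1) (by omega)
      exact ⟨s, hs, by omega⟩

-- Core invariant: while the fused loop is still running (0 ≤ count ≤ limit), it returns true
-- exactly when every remaining segment (including the open run of length count) fits the limit.
theorem vap_loop_eq (hotel : String) (limit : Int) (l : List String) (count : Int)
    (h0 : 0 ≤ count) (hle : count ≤ limit) :
    vapA_loop hotel limit l count = (vapB_segs hotel l count []).all (fun seg => decide (seg ≤ limit)) := by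
  induction l generalizing count with
  | nil =>
    simp only [vapA_loop, vapB_segs]
    split <;> simp [hle]
  | cons p rest ih =>
    simp only [vapA_loop, vapB_segs]
    by_cases hp : p == hotel
    · simp only [hp, if_pos]
      have hne : ¬ (0 : Int) > limit := by omega
      rw [if_neg hne, vapB_segs_acc, ih 0 (le_refl 0) (by omega)]
      split
      · simp [hle]
      · simp
    · simp only [hp, if_neg, Bool.false_eq_true, if_false]
      by_cases hg : count + 1 > limit
      · rw [if_pos hg]
        obtain ⟨s, hs, hsle⟩ := vapB_segs_big hotel rest (count + 1) (by omega)
        have hns : ¬ (s ≤ limit) := by omega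
        symm
        simp only [List.all_eq_false]
        exact ⟨s, hs, by simpa using hns⟩
      · rw [if_neg hg, ih (count + 1) (by omega) (by omega)]

-- A run of hotel-only places produces no segments.
theorem vapB_segs_all_hotel (hotel : String) (l : List String) (h : ∀ p ∈ l, p = hotel) :
    vapB_segs hotel l 0 [] = [] := by
  induction l with
  | nil => simp [vapB_segs]
  | cons p rest ih =>
    have hp : p = hotel := h p (by simp)
    simp only [vapB_segs, hp, BEq.rfl, if_pos]
    simpa using ih (fun q hq => h q (by simp [hq]))

-- With a non-hotel element ahead and a nonnegative open run, some produced segment is ≥ 1.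
theorem vapB_segs_pos (hotel : String) (l : List String) (current : Int) (h0 : 0 ≤ current)
    (h : ∃ p ∈ l, p ≠ hotel) : ∃ s ∈ vapB_segs hotel l current [], 1 ≤ s := by
  induction l generalizing current with
  | nil => simp at h
  | cons p rest ih =>
    simp only [vapB_segs]
    by_cases hp : p == hotel
    · simp only [hp, if_pos]
      have hrest : ∃ q ∈ rest, q ≠ hotel := by
        obtain ⟨q, hq, hne⟩ := h
        rcases List.mem_cons.mp hq with hq2 | hq2
        · exact absurd (hq2.trans (by simpa using hp)) hne
        · exact ⟨q, hq2, hne⟩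
      obtain ⟨s, hs, h1⟩ := ih 0 (le_refl 0) hrest
      rw [vapB_segs_acc]
      exact ⟨s, by simp [hs], h1⟩
    · simp only [hp, Bool.false_eq_true, if_false]
      obtain ⟨s, hs, h1⟩ := vapB_segs_big hotel rest (current + 1) (by omega)
      exact ⟨s, hs, by omega⟩

theorem verify_amount_places_spec : Claim_unchanged_verify_amount_places := by
  intro new_route users_parameters places_parameters _hdom hpre hnd
  obtain ⟨hhot, hlim⟩ := hpre
  unfold verify_amount_places verify_amount_places_alt
  set hotel := (List.lookup "hotel" places_parameters).getD "" with hh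
  set limit := (List.lookup "amount_daily_places" users_parameters).getD 0 with hl
  by_cases hneg : 0 ≤ limit
  · exact vap_loop_eq hotel limit new_route 0 (le_refl 0) hneg
  · -- negative limit; ¬ D_ means the route is empty or has some non-hotel place
    unfold D_verify_amount_places at hnd
    push_neg at hnd
    obtain ⟨hv, hvs⟩ := Option.isSome_iff_exists.mp hlim
    obtain ⟨hh2, hhs⟩ := Option.isSome_iff_exists.mp hhot
    have hhd : hotel = hh2 := by rw [hh, hhs]; rfl
    have hld : limit = hv := by rw [hl, hvs]; rfl
    rcases new_route with _ | ⟨p, rest⟩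
    · simp [vapA_loop, vapB_segs]
    · have hex : ∃ q ∈ p :: rest, q ≠ hotel := by
        obtain ⟨q, hq, hne⟩ := hnd (by simp) ⟨hv, hvs, by omega⟩ hh2 hhs
        exact ⟨q, hq, by rw [hhd]; exact hne⟩
      obtain ⟨s, hs, h1⟩ := vapB_segs_pos hotel (p :: rest) 0 (le_refl 0) hex
      have hB : ((vapB_segs hotel (p :: rest) 0 []).all (fun seg => decide (seg ≤ limit))) = false := by
        simp only [List.all_eq_false]
        exact ⟨s, hs, by simp; omega⟩
      rw [hB]
      simp only [vapA_loop]
      split <;> rw [if_pos (by omega)]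

theorem verify_amount_places_changed : Claim_changed_verify_amount_places := by
  unfold Claim_changed_verify_amount_places; decide

theorem verify_amount_places_tight : Claim_exact_verify_amount_places := by
  intro new_route users_parameters places_parameters _hdom _hpre hd
  obtain ⟨hne, ⟨v, hvs, hvneg⟩, ⟨h, hhs, hall0⟩⟩ := hd
  unfold verify_amount_places verify_amount_places_alt
  set hotel := (List.lookup "hotel" places_parameters).getD "" with hh
  set limit := (List.lookup "amount_daily_places" users_parameters).getD 0 with hl
  have hhd : hotel = h := by rw [hh, hhs]; rfl
  have hlim : limit < 0 := by rw [hl, hvs]; exact hvneg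
  have hall : ∀ p ∈ new_route, p = hotel := by rw [hhd]; exact hall0
  have hB : vapB_segs hotel new_route 0 [] = [] := vapB_segs_all_hotel hotel new_route hall
  rcases new_route with _ | ⟨p, rest⟩
  · exact absurd rfl hne
  · have hp : p = hotel := hall p (by simp)
    have h0 : ((0 : Int) > limit) := by omega
    rw [hp] at hB
    simp [vapA_loop, hp, h0, hB]
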